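-- pv_equiv track=rewrite | github.com/mitchellfaulk/set-card-game-review | Set_simulator.py | min_impact_indices
-- ===== SOURCE A (Python) =====
-- def impact_factor(indices, table, list_of_remaining_sets):
-- 	factor = 0
-- 	set_on_table = [table[indices[i]] for i in range(0,3)]
-- 	for set_of_cards in list_of_remaining_sets:
-- 		if not set(set_on_table).isdisjoint(set_of_cards):
-- 			factor += 1
-- 	return factor
--
-- def min_impact_indices(possible_sets_indices, table, list_of_remaining_sets):
-- 	min_impact_factor = 120
-- 	min_impact_indices = possible_sets_indices[0]
-- 	for i in range(len(possible_sets_indices)):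
-- 		if impact_factor(possible_sets_indices[i], table, list_of_remaining_sets) < min_impact_factor:
-- 			min_impact_factor = impact_factor(possible_sets_indices[i], table, list_of_remaining_sets)
-- 			min_impact_indices = possible_sets_indices[i]
-- 	return min_impact_indices
-- ===== SOURCE B (Python) =====
-- def min_impact_indices(possible_sets_indices, table, list_of_remaining_sets):
--     # inverted index: card -> set of positions of remaining sets containing it
--     index = {}
--     for j, cards in enumerate(list_of_remaining_sets):
--         for card in cards:
--             index.setdefault(card, set()).add(j)
--     empty = set()
--     min_impact_factor = 120
--     best = possible_sets_indices[0]
--     for indices in possible_sets_indices: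
--         hit = (index.get(table[indices[0]], empty)
--                | index.get(table[indices[1]], empty)
--                | index.get(table[indices[2]], empty))
--         if len(hit) < min_impact_factor:
--             min_impact_factor = len(hit)
--             best = indices
--     return best
-- ===== Notes on version B (the rewrite author's own statement) =====
-- stated objective: alternative
-- what changed: B builds an inverted index (card -> set of positions of remaining sets containing it) once, and scores each candidate triple as the size of the union of its three cards' position sets, instead of A's rescan of all remaining sets (twice) per triple; the sentinel 120 and strict-< first-minimum scan are kept.
import Mathlib
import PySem

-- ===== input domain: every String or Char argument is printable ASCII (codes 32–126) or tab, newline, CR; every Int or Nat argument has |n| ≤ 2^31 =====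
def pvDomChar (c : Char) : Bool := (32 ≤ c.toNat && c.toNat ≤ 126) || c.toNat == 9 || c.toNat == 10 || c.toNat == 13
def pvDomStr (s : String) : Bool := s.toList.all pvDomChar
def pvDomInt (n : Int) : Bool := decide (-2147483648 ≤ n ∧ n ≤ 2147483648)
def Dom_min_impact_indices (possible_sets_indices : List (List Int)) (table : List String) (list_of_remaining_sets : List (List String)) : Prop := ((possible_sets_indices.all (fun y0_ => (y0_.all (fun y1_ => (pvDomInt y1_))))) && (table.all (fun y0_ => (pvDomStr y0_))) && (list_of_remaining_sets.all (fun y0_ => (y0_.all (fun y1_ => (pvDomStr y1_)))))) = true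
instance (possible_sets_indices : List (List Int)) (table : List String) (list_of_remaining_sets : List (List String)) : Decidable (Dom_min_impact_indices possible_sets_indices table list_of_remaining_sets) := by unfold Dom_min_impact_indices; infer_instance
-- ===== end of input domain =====

-- B replaces A's per-triple rescan of all remaining sets by an inverted index (card → set of
-- positions of remaining sets containing it) built once; per-triple impact = size of the union
-- of the three cards' position sets. Same sentinel 120 and strict-< first-minimum tie-break.

-- ===== PORT A =====
def impact_factor (indices : List Int) (table : List String) (list_of_remaining_sets : List (List String)) : Int :=
  let set_on_table := (PySem.List.pyRange 0 3).map
    (fun i => PySem.List.pyGetD table (PySem.List.pyGetD indices i 0) "")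
  list_of_remaining_sets.foldl
    (fun factor set_of_cards =>
      if !(PySem.Set.isdisjoint (PySem.Set.ofList set_on_table) set_of_cards) then factor + 1
      else factor)
    0

def min_impact_indices (possible_sets_indices : List (List Int)) (table : List String) (list_of_remaining_sets : List (List String)) : List Int :=
  ((PySem.List.pyRange 0 (PySem.List.len possible_sets_indices)).foldl
    (fun (st : Int × List Int) i =>
      if impact_factor (PySem.List.pyGetD possible_sets_indices i []) table list_of_remaining_sets < st.1 then
        (impact_factor (PySem.List.pyGetD possible_sets_indices i []) table list_of_remaining_sets,
         PySem.List.pyGetD possible_sets_indices i [])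
      else st)
    (120, PySem.List.pyGetD possible_sets_indices 0 [])).2

-- ===== PORT B =====
-- inverted index: card → set of positions (enumerate) of remaining sets containing it
def pvBuildIndex (list_of_remaining_sets : List (List String)) : PySem.Dict String (PySem.Set Int) :=
  (PySem.List.enumerate list_of_remaining_sets).foldl
    (fun d p => p.2.foldl
      (fun d card => d.insert card (PySem.Set.add (d.getD card PySem.Set.empty) p.1)) d)
    PySem.Dict.empty

def pvHit (idx : PySem.Dict String (PySem.Set Int)) (table : List String) (indices : List Int) : PySem.Set Int :=
  PySem.Set.union
    (PySem.Set.union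
      (idx.getD (PySem.List.pyGetD table (PySem.List.pyGetD indices 0 0) "") PySem.Set.empty)
      (idx.getD (PySem.List.pyGetD table (PySem.List.pyGetD indices 1 0) "") PySem.Set.empty))
    (idx.getD (PySem.List.pyGetD table (PySem.List.pyGetD indices 2 0) "") PySem.Set.empty)

def min_impact_indices_alt (possible_sets_indices : List (List Int)) (table : List String) (list_of_remaining_sets : List (List String)) : List Int :=
  let idx := pvBuildIndex list_of_remaining_sets
  (possible_sets_indices.foldl
    (fun (st : Int × List Int) indices =>
      if PySem.Set.len (pvHit idx table indices) < st.1 then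
        (PySem.Set.len (pvHit idx table indices), indices)
      else st)
    (120, PySem.List.pyGetD possible_sets_indices 0 [])).2

-- ===== PRECONDITION & SPEC =====
-- Pre_ excludes exactly the inputs where A raises IndexError: an empty candidate list, a
-- candidate triple with fewer than 3 entries, or a table index outside Python's valid range.
def Pre_min_impact_indices (possible_sets_indices : List (List Int)) (table : List String) (list_of_remaining_sets : List (List String)) : Prop :=
  possible_sets_indices ≠ [] ∧
  ∀ t ∈ possible_sets_indices,
    3 ≤ t.length ∧ ∀ k ∈ t.take 3, PySem.Raise.InRange table.length k
instance (possible_sets_indices : List (List Int)) (table : List String) (list_of_remaining_sets : List (List String)) : Decidable (Pre_min_impact_indices possible_sets_indices table list_of_remaining_sets) := by unfold Pre_min_impact_indices PySem.Raise.InRange; infer_instance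

def pvWitness_min_impact_indices : List (List Int) × List String × List (List String) :=
  ([[0, 1, 2], [0, 1, -1]], ["a", "b", "c"], [["a", "d"], ["e"]])

def Spec_min_impact_indices (possible_sets_indices : List (List Int)) (table : List String) (list_of_remaining_sets : List (List String)) (out : List Int) : Prop := out = min_impact_indices_alt possible_sets_indices table list_of_remaining_sets
instance (possible_sets_indices : List (List Int)) (table : List String) (list_of_remaining_sets : List (List String)) (out : List Int) : Decidable (Spec_min_impact_indices possible_sets_indices table list_of_remaining_sets out) := by unfold Spec_min_impact_indices; infer_instance

-- ===== CLAIM (what is proved, stated in full; the proofs are below) =====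
def Claim_equal_min_impact_indices : Prop := ∀ (possible_sets_indices : List (List Int)) (table : List String) (list_of_remaining_sets : List (List String)), Dom_min_impact_indices possible_sets_indices table list_of_remaining_sets → Pre_min_impact_indices possible_sets_indices table list_of_remaining_sets → Spec_min_impact_indices possible_sets_indices table list_of_remaining_sets (min_impact_indices possible_sets_indices table list_of_remaining_sets)

-- ===== LEMMAS AND PROOFS =====

-- the inner loop 'for card in s: index.setdefault(card, set()).add(j)', read at one key c
theorem pv_inner_getD (s : List String) (d : PySem.Dict String (PySem.Set Int)) (j : Int) (c : String) :
    ((s.foldl (fun d card => d.insert card (PySem.Set.add (d.getD card PySem.Set.empty) j)) d).getD c PySem.Set.empty)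
      = if c ∈ s then PySem.Set.add (d.getD c PySem.Set.empty) j else d.getD c PySem.Set.empty := by
  induction s generalizing d with
  | nil => simp
  | cons a s ih =>
    simp only [List.foldl_cons, ih, PySem.Dict.getD_insert, List.mem_cons]
    by_cases hc : c = a
    · subst hc
      by_cases hm : c ∈ s <;> simp [hm]
    · by_cases hm : c ∈ s <;> simp [hm, hc]

-- membership of a position x in the index built from 'enumerate rem start' on top of dict d
theorem pv_index_mem (rem : List (List String)) (start : Int) (d : PySem.Dict String (PySem.Set Int)) (c : String) (x : Int) :
    (x ∈ ((PySem.List.enumerate rem start).foldl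
        (fun d p => p.2.foldl (fun d card => d.insert card (PySem.Set.add (d.getD card PySem.Set.empty) p.1)) d) d).getD c PySem.Set.empty)
    ↔ x ∈ d.getD c PySem.Set.empty ∨ ∃ k : Nat, k < rem.length ∧ x = start + k ∧ c ∈ rem.getD k [] := by
  induction rem generalizing start d with
  | nil => simp [PySem.List.enumerate]
  | cons r rs ih =>
    rw [PySem.List.enumerate_cons, List.foldl_cons, ih]
    have hinner := pv_inner_getD r d start c
    constructor
    · rintro (hx | ⟨k, hk, hxe, hm⟩)
      · rw [hinner] at hx
        by_cases hc : c ∈ r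
        · rw [if_pos hc, PySem.Set.mem_add] at hx
          rcases hx with hx | hx
          · exact Or.inl hx
          · refine Or.inr ⟨0, by simp, by omega, by simpa using hc⟩
        · rw [if_neg hc] at hx; exact Or.inl hx
      · refine Or.inr ⟨k + 1, by simpa using hk, ?_, by simpa using hm⟩
        push_cast at hxe ⊢
        omega
    · rintro (hx | ⟨k, hk, hxe, hm⟩)
      · left; rw [hinner]
        by_cases hc : c ∈ r
        · rw [if_pos hc, PySem.Set.mem_add]; exact Or.inl hx
        · rwa [if_neg hc]
      · cases k with
        | zero =>
          left; rw [hinner]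
          have hc : c ∈ r := by simpa using hm
          rw [if_pos hc, PySem.Set.mem_add]
          right
          push_cast at hxe
          omega
        | succ k =>
          right
          simp only [List.length_cons] at hk
          refine ⟨k, by omega, ?_, by simpa using hm⟩
          push_cast at hxe ⊢
          omega

-- every set stored in the index is duplicate-free
theorem pv_index_nodup (rem : List (List String)) (start : Int) (d : PySem.Dict String (PySem.Set Int))
    (hd : ∀ c, ((d.getD c PySem.Set.empty) : List Int).Nodup) (c : String) :
    (((PySem.List.enumerate rem start).foldl
        (fun d p => p.2.foldl (fun d card => d.insert card (PySem.Set.add (d.getD card PySem.Set.empty) p.1)) d) d).getD c PySem.Set.empty : List Int).Nodup := by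
  induction rem generalizing start d with
  | nil => simpa [PySem.List.enumerate] using hd c
  | cons r rs ih =>
    rw [PySem.List.enumerate_cons, List.foldl_cons]
    refine ih (start + 1) _ (fun c' => ?_)
    rw [pv_inner_getD]
    by_cases hc : c' ∈ r
    · rw [if_pos hc]; exact PySem.Set.nodup_add _ _ (hd c')
    · rw [if_neg hc]; exact hd c'

theorem pv_hit_mem (table : List String) (rem : List (List String)) (t : List Int) (x : Int) :
    x ∈ (pvHit (pvBuildIndex rem) table t : List Int) ↔
      ∃ k : Nat, k < rem.length ∧ x = (k : Int) ∧
        ((PySem.List.pyGetD table (PySem.List.pyGetD t 0 0) "") ∈ rem.getD k [] ∨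
         (PySem.List.pyGetD table (PySem.List.pyGetD t 1 0) "") ∈ rem.getD k [] ∨
         (PySem.List.pyGetD table (PySem.List.pyGetD t 2 0) "") ∈ rem.getD k []) := by
  unfold pvHit pvBuildIndex
  rw [PySem.Set.mem_union, PySem.Set.mem_union, pv_index_mem, pv_index_mem, pv_index_mem]
  simp only [PySem.Dict.getD_empty]
  constructor
  · rintro (((h | ⟨k, hk, hx, hm⟩) | (h | ⟨k, hk, hx, hm⟩)) | (h | ⟨k, hk, hx, hm⟩)) <;>
      first
        | cases h
        | exact ⟨k, hk, by omega, by tauto⟩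
  · rintro ⟨k, hk, hx, (hm | hm | hm)⟩
    · exact Or.inl (Or.inl (Or.inr ⟨k, hk, by omega, hm⟩))
    · exact Or.inl (Or.inr (Or.inr ⟨k, hk, by omega, hm⟩))
    · exact Or.inr (Or.inr ⟨k, hk, by omega, hm⟩)

theorem pv_hit_nodup (table : List String) (rem : List (List String)) (t : List Int) :
    (pvHit (pvBuildIndex rem) table t : List Int).Nodup := by
  unfold pvHit pvBuildIndex
  refine PySem.Set.nodup_union _ _ (PySem.Set.nodup_union _ _ ?_)
  exact pv_index_nodup _ _ _ (fun c => by simp [PySem.Dict.getD_empty, PySem.Set.empty]) _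

-- length of the filtered range equals length of the filtered list
theorem pv_range_filter_len {α : Type} (l : List α) (p : α → Bool) (dflt : α) :
    ((List.range l.length).filter (fun k => p (l.getD k dflt))).length = (l.filter p).length := by
  induction l using List.reverseRecOn with
  | nil => simp
  | append_singleton l a ih =>
    rw [List.length_append, List.length_singleton, List.range_succ, List.filter_append,
        List.filter_append, List.length_append, List.length_append]
    have hcongr : (List.range l.length).filter (fun k => p ((l ++ [a]).getD k dflt))
        = (List.range l.length).filter (fun k => p (l.getD k dflt)) := by
      refine List.filter_congr (fun k hk => ?_)
      rw [List.getD_append _ _ _ _ (by simpa using hk)]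
    rw [hcongr, ih]
    congr 1
    cases hpa : p a <;> simp [List.getD, hpa]

-- A's scan of the remaining sets is a count of those meeting {c0, c1, c2}
theorem pv_countA (c0 c1 c2 : String) (rem : List (List String)) :
    rem.foldl
      (fun factor set_of_cards =>
        if !(PySem.Set.isdisjoint (PySem.Set.ofList [c0, c1, c2]) set_of_cards) then factor + 1
        else factor) 0
    = ((rem.filter (fun s => decide (c0 ∈ s ∨ c1 ∈ s ∨ c2 ∈ s))).length : Int) := by
  rw [PySem.List.foldl_count_if (fun s => !(PySem.Set.isdisjoint (PySem.Set.ofList [c0, c1, c2]) s)) rem 0]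
  rw [zero_add, List.countP_eq_length_filter]
  congr 2
  refine List.filter_congr (fun s _ => ?_)
  have hd := PySem.Set.isdisjoint_iff (PySem.Set.ofList [c0, c1, c2]) s
  have hmem : ∀ x, x ∈ PySem.Set.ofList [c0, c1, c2] ↔ (x = c0 ∨ x = c1 ∨ x = c2) := by
    intro x; rw [PySem.Set.mem_ofList]; simp
  by_cases h : c0 ∈ s ∨ c1 ∈ s ∨ c2 ∈ s
  · have hnall : ¬ ∀ x ∈ PySem.Set.ofList [c0, c1, c2], x ∉ s := by
      intro hall
      rcases h with h | h | h
      · exact hall c0 ((hmem c0).mpr (Or.inl rfl)) h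
      · exact hall c1 ((hmem c1).mpr (Or.inr (Or.inl rfl))) h
      · exact hall c2 ((hmem c2).mpr (Or.inr (Or.inr rfl))) h
    have hfalse : PySem.Set.isdisjoint (PySem.Set.ofList [c0, c1, c2]) s = false := by
      rcases Bool.eq_false_or_eq_true (PySem.Set.isdisjoint (PySem.Set.ofList [c0, c1, c2]) s) with hb | hb
      · exact absurd (hd.mp hb) hnall
      · exact hb
    rw [hfalse]; simp [h]
  · have htrue : PySem.Set.isdisjoint (PySem.Set.ofList [c0, c1, c2]) s = true := by
      refine hd.mpr (fun x hx => ?_)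
      rcases (hmem x).mp hx with rfl | rfl | rfl <;> tauto
    rw [htrue]; simp [h]

-- the per-triple impact computed by A equals the union size computed by B
theorem pv_impact_eq (t : List Int) (table : List String) (rem : List (List String)) :
    impact_factor t table rem = PySem.Set.len (pvHit (pvBuildIndex rem) table t) := by
  have hrange : PySem.List.pyRange 0 3 = [0, 1, 2] := by decide
  unfold impact_factor
  rw [hrange]
  simp only [List.map_cons, List.map_nil]
  refine (pv_countA (PySem.List.pyGetD table (PySem.List.pyGetD t 0 0) "")
      (PySem.List.pyGetD table (PySem.List.pyGetD t 1 0) "")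
      (PySem.List.pyGetD table (PySem.List.pyGetD t 2 0) "") rem).trans ?_
  have hU := pv_hit_nodup table rem t
  have hL : ∀ x : Int, x ∈ (pvHit (pvBuildIndex rem) table t : List Int) ↔
      x ∈ ((List.range rem.length).filter
        (fun k => decide ((PySem.List.pyGetD table (PySem.List.pyGetD t 0 0) "") ∈ rem.getD k [] ∨
                          (PySem.List.pyGetD table (PySem.List.pyGetD t 1 0) "") ∈ rem.getD k [] ∨
                          (PySem.List.pyGetD table (PySem.List.pyGetD t 2 0) "") ∈ rem.getD k []))).map Int.ofNat := by
    intro x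
    rw [pv_hit_mem]
    simp only [List.mem_map, List.mem_filter, List.mem_range, decide_eq_true_eq]
    constructor
    · rintro ⟨k, hk, hx, hm⟩; exact ⟨k, ⟨hk, hm⟩, hx.symm⟩
    · rintro ⟨k, ⟨hk, hm⟩, hx⟩; exact ⟨k, hk, hx.symm, hm⟩
  have hLnodup : (((List.range rem.length).filter
      (fun k => decide ((PySem.List.pyGetD table (PySem.List.pyGetD t 0 0) "") ∈ rem.getD k [] ∨
                        (PySem.List.pyGetD table (PySem.List.pyGetD t 1 0) "") ∈ rem.getD k [] ∨
                        (PySem.List.pyGetD table (PySem.List.pyGetD t 2 0) "") ∈ rem.getD k []))).map Int.ofNat).Nodup := by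
    refine List.Nodup.map (fun a b h => Int.ofNat.inj h) ?_
    exact (List.nodup_range).filter _
  have hfin : (pvHit (pvBuildIndex rem) table t : List Int).toFinset
      = (((List.range rem.length).filter
        (fun k => decide ((PySem.List.pyGetD table (PySem.List.pyGetD t 0 0) "") ∈ rem.getD k [] ∨
                          (PySem.List.pyGetD table (PySem.List.pyGetD t 1 0) "") ∈ rem.getD k [] ∨
                          (PySem.List.pyGetD table (PySem.List.pyGetD t 2 0) "") ∈ rem.getD k []))).map Int.ofNat).toFinset := by
    ext x
    simp only [List.mem_toFinset]
    exact hL x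
  have hlen : (pvHit (pvBuildIndex rem) table t : List Int).length
      = (((List.range rem.length).filter
        (fun k => decide ((PySem.List.pyGetD table (PySem.List.pyGetD t 0 0) "") ∈ rem.getD k [] ∨
                          (PySem.List.pyGetD table (PySem.List.pyGetD t 1 0) "") ∈ rem.getD k [] ∨
                          (PySem.List.pyGetD table (PySem.List.pyGetD t 2 0) "") ∈ rem.getD k []))).map Int.ofNat).length := by
    rw [← List.toFinset_card_of_nodup hU, ← List.toFinset_card_of_nodup hLnodup, hfin]
  have hrf := pv_range_filter_len rem
    (fun s => decide ((PySem.List.pyGetD table (PySem.List.pyGetD t 0 0) "") ∈ s ∨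
                      (PySem.List.pyGetD table (PySem.List.pyGetD t 1 0) "") ∈ s ∨
                      (PySem.List.pyGetD table (PySem.List.pyGetD t 2 0) "") ∈ s)) []
  rw [PySem.Set.len, hlen, List.length_map]
  omega

-- A's index loop over range(len(psi)) is a direct fold over psi (init is a parameter so the
-- rewrite touches only the list being folded)
theorem pv_outer (psi : List (List Int)) (table : List String) (rem : List (List String)) (init : Int × List Int) :
    (PySem.List.pyRange 0 (PySem.List.len psi)).foldl
      (fun (st : Int × List Int) i =>
        if impact_factor (PySem.List.pyGetD psi i []) table rem < st.1 then
          (impact_factor (PySem.List.pyGetD psi i []) table rem, PySem.List.pyGetD psi i [])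
        else st) init
    = psi.foldl
      (fun (st : Int × List Int) t =>
        if impact_factor t table rem < st.1 then (impact_factor t table rem, t) else st) init := by
  conv_rhs => rw [← PySem.List.map_pyGetD_pyRange_zero psi ([] : List Int)]
  rw [List.foldl_map]

-- ===== VERDICT (by name: the statement is the Claim_ definition above) =====
theorem min_impact_indices_spec : Claim_equal_min_impact_indices := by
  intro psi table rem _ _
  unfold Spec_min_impact_indices min_impact_indices min_impact_indices_alt
  congr 1
  rw [pv_outer]
  exact PySem.List.foldl_congr_mem' _ _ _ _ (fun t _ st => by rw [pv_impact_eq])
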